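-- pv_equiv track=rewrite | github.com/cswartzell/LeetCode-Problems | Problems/2522. Partition String Into Substrings With Values at Most K/2522. Partition String Into Substrings With Values at Most K.py | minimumPartition
-- ===== SOURCE A (Python) =====
-- def minimumPartition(s: str, k: int) -> int:
--     if k <= 9:
--         if max(set(s))>str(k):
--             return -1
--
--     s_ints = list(int(x) for x in s)
--
--     ans = 1
--     total = s_ints[0]
--     for digit in s_ints[1:]:
--         if (update := total*10 + digit) <= k:
--             total = update
--         else:
--             total = digit
--             ans += 1
--     return ans
-- ===== SOURCE B (Python) =====
-- def minimumPartition(s: str, k: int) -> int: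
--     if k <= 9 and max(s) > str(k):
--         return -1
--     digits = [int(c) for c in s]
--     dp = [0]
--     for i in range(1, len(digits) + 1):
--         best = dp[i - 1] + 1
--         val = digits[i - 1]
--         p = 10
--         j = i - 2
--         while j >= 0:
--             val = digits[j] * p + val
--             if val > k:
--                 break
--             if dp[j] + 1 < best:
--                 best = dp[j] + 1
--             p *= 10
--             j -= 1
--         dp.append(best)
--     return dp[len(digits)]
-- ===== Notes on version B (the rewrite author's own statement) =====
-- stated objective: alternative
-- what changed: A's single-pass greedy (keep extending the running chunk value, cut when it would exceed k) is replaced by a prefix dynamic program: dp[i] = min over feasible last pieces s[j:i] (value <= k, found by a backward scan that stops as soon as the piece value exceeds k) of dp[j]+1, returning dp[n]; the infeasibility/-1 guard stays a one-line pre-check.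
import Mathlib
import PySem

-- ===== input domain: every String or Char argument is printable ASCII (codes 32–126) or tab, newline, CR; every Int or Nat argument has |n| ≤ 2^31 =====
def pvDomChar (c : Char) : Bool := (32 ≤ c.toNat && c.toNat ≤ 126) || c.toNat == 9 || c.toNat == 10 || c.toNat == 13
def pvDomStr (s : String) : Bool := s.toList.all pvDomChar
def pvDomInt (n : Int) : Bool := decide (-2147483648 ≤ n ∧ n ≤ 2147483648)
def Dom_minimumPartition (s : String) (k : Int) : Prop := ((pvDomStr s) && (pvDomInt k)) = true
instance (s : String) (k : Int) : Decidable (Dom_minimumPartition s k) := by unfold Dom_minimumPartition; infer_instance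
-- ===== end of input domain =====

-- B replaces A's greedy single pass by a prefix dynamic program (dp[i] = min pieces for s[:i],
-- scanning feasible last pieces backwards); objective: alternative algorithm, same return values.

-- ===== PORT A =====
-- step of A's for-loop over the remaining digits, state = (ans, total)
def pvStepA (k : Int) (st : Int × Int) (d : Int) : Int × Int :=
  if st.2 * 10 + d ≤ k then (st.1, st.2 * 10 + d) else (st.1 + 1, d)

def pvBodyA (s : String) (k : Int) : Int :=
  -- s_ints = list(int(x) for x in s); int on a non-digit char raises ValueError (excluded by Pre_)
  let s_ints := s.toList.map (fun c => (PySem.Int.ofChars? [c]).getD 0)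
  -- ans = 1; total = s_ints[0]  (IndexError on empty s excluded by Pre_)
  let init : Int × Int := (1, PySem.List.pyGetD s_ints 0 0)
  (List.foldl (pvStepA k) init (PySem.List.slice s_ints (some 1))).1

def minimumPartition (s : String) (k : Int) : Int :=
  if k ≤ 9 then
    -- max(set(s)) — the max char (set() does not change the maximum); raises on empty s (excluded by Pre_)
    match PySem.List.max? s.toList (fun c => c) with
    | none => -1
    | some m =>
      -- max(set(s)) > str(k): Python string '>' is code-point lexicographic, i.e. toChars k < [m]
      if PySem.Int.toChars k < [m] then -1 else pvBodyA s k
  else pvBodyA s k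

-- ===== PORT B =====
def pvDigitsB (s : String) : List Int :=
  s.toList.map (fun c => (PySem.Int.ofChars? [c]).getD 0)

-- the inner 'while j >= 0' loop; fuel = j+1, so fuel 0 means j = -1 (loop done)
def pvInnerB (digits dp : List Int) (k : Int) : Nat → Int → Int → Int → Int
  | 0, _, _, best => best
  | j+1, val, p, best =>
    let v := digits.getD j 0 * p + val    -- val = digits[j]*p + val  (index j is in range here)
    if k < v then best                    -- if val > k: break
    else pvInnerB digits dp k j v (p * 10)
           (if dp.getD j 0 + 1 < best then dp.getD j 0 + 1 else best)

-- the outer 'for i in range(1, n+1)' loop: pvDpB digits k m is the dp list after i = m iterations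
def pvDpB (digits : List Int) (k : Int) : Nat → List Int
  | 0 => [(0 : Int)]
  | m+1 =>
    let dp := pvDpB digits k m
    dp ++ [pvInnerB digits dp k m (digits.getD m 0) 10 (dp.getD m 0 + 1)]

def pvBodyB (s : String) (k : Int) : Int :=
  let digits := pvDigitsB s
  (pvDpB digits k digits.length).getD digits.length 0

def minimumPartition_alt (s : String) (k : Int) : Int :=
  -- if k <= 9 and max(s) > str(k): return -1   (max('') raises ValueError, excluded by Pre_)
  if k ≤ 9 then
    match PySem.List.max? s.toList (fun c => c) with
    | none => -1
    | some m => if PySem.Int.toChars k < [m] then -1 else pvBodyB s k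
  else pvBodyB s k

-- ===== PRECONDITION & SPEC =====
-- Pre_ is exactly the domain on which A returns: s nonempty, and either all characters are digits
-- or (k ≤ 9 and the max character exceeds str(k), where A returns -1 before parsing).
def Pre_minimumPartition (s : String) (k : Int) : Prop :=
  s.toList ≠ [] ∧
  ((s.toList.all (fun c => decide ('0' ≤ c) && decide (c ≤ '9')) = true) ∨
   (k ≤ 9 ∧ (PySem.List.max? s.toList (fun c => c)).any
      (fun m => decide (PySem.Int.toChars k < [m])) = true))
instance (s : String) (k : Int) : Decidable (Pre_minimumPartition s k) := by
  unfold Pre_minimumPartition; infer_instance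

def pvWitness_minimumPartition : String × Int := ("1992", 21)

def Spec_minimumPartition (s : String) (k : Int) (out : Int) : Prop := out = minimumPartition_alt s k
instance (s : String) (k : Int) (out : Int) : Decidable (Spec_minimumPartition s k out) := by
  unfold Spec_minimumPartition; infer_instance

-- ===== CLAIM (what is proved, stated in full; the proofs are below) =====
def Claim_equal_minimumPartition : Prop := ∀ (s : String) (k : Int), Dom_minimumPartition s k → Pre_minimumPartition s k → Spec_minimumPartition s k (minimumPartition s k)

-- ===== LEMMAS AND PROOFS =====

-- value of the digit segment [j, i) of ds, most significant digit first
def segv (ds : List Int) (j : Nat) : Nat → Int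
  | 0 => 0
  | i+1 => if i < j then 0 else segv ds j i * 10 + ds.getD i 0

-- indexed greedy state of A after i digits: (ans, total, start index of the current chunk)
def gf (ds : List Int) (k : Int) : Nat → Int × Int × Nat
  | 0 => (0, 0, 0)
  | 1 => (1, ds.getD 0 0, 0)
  | n+2 =>
    let p := gf ds k (n+1)
    let d := ds.getD (n+1) 0
    if p.2.1 * 10 + d ≤ k then (p.1, p.2.1 * 10 + d, p.2.2) else (p.1 + 1, d, n+1)

lemma gf_succ (ds : List Int) (k : Int) (n : Nat) (hn : 1 ≤ n) :
    gf ds k (n+1) =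
      (if (gf ds k n).2.1 * 10 + ds.getD n 0 ≤ k
       then ((gf ds k n).1, (gf ds k n).2.1 * 10 + ds.getD n 0, (gf ds k n).2.2)
       else ((gf ds k n).1 + 1, ds.getD n 0, n)) := by
  obtain ⟨m, rfl⟩ : ∃ m, n = m + 1 := ⟨n - 1, by omega⟩
  rw [gf]

lemma segv_nonneg (ds : List Int) (hd : ∀ n : Nat, 0 ≤ ds.getD n 0) (j : Nat) :
    ∀ i : Nat, 0 ≤ segv ds j i := by
  intro i; induction i with
  | zero => simp [segv]
  | succ i ih =>
    rw [segv]; split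
    · rfl
    · have := hd i; positivity

lemma segv_zero (ds : List Int) (j : Nat) : ∀ i : Nat, i ≤ j → segv ds j i = 0 := by
  intro i hij; cases i with
  | zero => rfl
  | succ i => rw [segv, if_pos (by omega)]

lemma segv_mono (ds : List Int) (hd : ∀ n : Nat, 0 ≤ ds.getD n 0) {j j' : Nat} (hjj : j ≤ j') :
    ∀ i : Nat, segv ds j' i ≤ segv ds j i := by
  intro i; induction i with
  | zero => simp [segv]
  | succ i ih =>
    rw [segv, segv]
    by_cases h : i < j'
    · rw [if_pos h]
      split
      · rfl
      · have h1 := segv_nonneg ds hd j i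
        have h2 := hd i
        positivity
    · rw [if_neg h, if_neg (by omega)]
      have := hd i; linarith

lemma segv_ext (ds : List Int) (hd : ∀ n : Nat, 0 ≤ ds.getD n 0) (j i : Nat) :
    segv ds j i ≤ segv ds j (i+1) := by
  conv_rhs => rw [segv]
  split
  · rw [segv_zero ds j i (by omega)]
  · have h1 := segv_nonneg ds hd j i
    have h2 := hd i
    linarith

lemma segv_peel (ds : List Int) {j : Nat} :
    ∀ i : Nat, j < i → segv ds j i = ds.getD j 0 * 10 ^ (i - 1 - j) + segv ds (j+1) i := by
  intro i
  induction i with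
  | zero => omega
  | succ i ih =>
    intro hji
    by_cases hj : j = i
    · subst hj
      rw [segv, if_neg (by omega), segv_zero ds j j le_rfl,
          segv_zero ds (j+1) (j+1) le_rfl]
      simp
    · have hji' : j < i := by omega
      rw [segv, if_neg (by omega), ih hji', segv, if_neg (by omega)]
      have he : i + 1 - 1 - j = (i - 1 - j) + 1 := by omega
      rw [he, pow_succ]
      ring

-- combined greedy invariant
lemma ginv (ds : List Int) (k : Int)
    (hd : ∀ n : Nat, 0 ≤ ds.getD n 0 ∧ ds.getD n 0 ≤ k) :
    ∀ i : Nat, 1 ≤ i →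
      (gf ds k i).2.2 < i ∧
      (gf ds k i).2.1 = segv ds (gf ds k i).2.2 i ∧
      (gf ds k i).2.1 ≤ k ∧
      (gf ds k (gf ds k i).2.2).1 = (gf ds k i).1 - 1 ∧
      (∀ j : Nat, (gf ds k i).2.2 < j → j ≤ i → (gf ds k j).1 = (gf ds k i).1) ∧
      (∀ j : Nat, j ≤ i → segv ds j i ≤ k → (gf ds k i).1 - 1 ≤ (gf ds k j).1) := by
  intro i hi
  induction i, hi using Nat.le_induction with
  | base =>
    refine ⟨by simp [gf], by simp [gf, segv], (hd 0).2, by simp [gf], ?_, ?_⟩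
    · intro j h1 h2
      have : j = 1 := by omega
      subst this; rfl
    · intro j hj _
      interval_cases j <;> simp [gf]
  | succ n hn IH =>
    obtain ⟨hc, ht, htk, hcA, he, hkey⟩ := IH
    have hge := gf_succ ds k n hn
    by_cases hcase : (gf ds k n).2.1 * 10 + ds.getD n 0 ≤ k
    · -- the greedy step extends the current chunk
      rw [if_pos hcase] at hge
      have hb2 : segv ds (gf ds k n).2.2 (n+1)
          = (gf ds k n).2.1 * 10 + ds.getD n 0 := by
        rw [segv, if_neg (by omega), ← ht]
      refine ⟨?_, ?_, ?_, ?_, ?_, ?_⟩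
      · rw [hge]; dsimp only; omega
      · rw [hge]; dsimp only; rw [hb2]
      · rw [hge]; dsimp only; exact hcase
      · rw [hge]; dsimp only; exact hcA
      · intro j h1 h2
        rw [hge] at h1 ⊢; dsimp only at h1 ⊢
        by_cases hj1 : j = n + 1
        · subst hj1; rw [hge]
        · exact he j h1 (by omega)
      · intro j hj hfeas
        rw [hge]; dsimp only
        by_cases hj1 : j = n + 1
        · subst hj1; rw [hge]; dsimp only; omega
        · have hjn : j ≤ n := by omega
          have hfi : segv ds j n ≤ k := by
            have h1 := segv_ext ds (fun m => (hd m).1) j n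
            linarith
          exact hkey j hjn hfi
    · -- the greedy step starts a new chunk
      rw [if_neg hcase] at hge
      have hb2 : segv ds n (n+1) = ds.getD n 0 := by
        rw [segv, if_neg (by omega), segv_zero ds n n le_rfl]; ring
      refine ⟨?_, ?_, ?_, ?_, ?_, ?_⟩
      · rw [hge]; dsimp only; omega
      · rw [hge]; dsimp only; rw [hb2]
      · rw [hge]; dsimp only; exact (hd n).2
      · rw [hge]; dsimp only; omega
      · intro j h1 h2
        rw [hge] at h1 ⊢; dsimp only at h1 ⊢
        have : j = n + 1 := by omega
        subst this; rw [hge]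
      · intro j hj hfeas
        rw [hge]; dsimp only
        by_cases hj1 : j = n + 1
        · subst hj1; rw [hge]; dsimp only; omega
        · by_cases hj2 : j = n
          · subst hj2; omega
          · have hjn : j < n := by omega
            by_cases hcj : (gf ds k n).2.2 < j
            · rw [he j hcj (by omega)]; omega
            · exfalso
              have h1 : segv ds (gf ds k n).2.2 (n+1) ≤ segv ds j (n+1) :=
                segv_mono ds (fun m => (hd m).1) (by omega) (n+1)
              have h2 : segv ds (gf ds k n).2.2 (n+1)
                  = (gf ds k n).2.1 * 10 + ds.getD n 0 := by
                rw [segv, if_neg (by omega), ← ht]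
              linarith

lemma segv_single (ds : List Int) (n : Nat) : segv ds n (n+1) = ds.getD n 0 := by
  rw [segv, if_neg (by omega), segv_zero ds n n le_rfl]; ring

lemma gf_fold (ds : List Int) (k : Int) :
    ∀ i : Nat, 1 ≤ i → i ≤ ds.length →
      List.foldl (pvStepA k) (1, ds.getD 0 0) ((ds.take i).drop 1) =
        ((gf ds k i).1, (gf ds k i).2.1) := by
  intro i hi
  induction i, hi using Nat.le_induction with
  | base =>
    intro hlen
    have h1 : (ds.take 1).drop 1 = [] := by
      rw [List.drop_eq_nil_iff]
      simp
    rw [h1]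
    rfl
  | succ n hn IH =>
    intro hlen
    have hnl : n < ds.length := by omega
    have h1 : ds.take (n+1) = ds.take n ++ [ds.getD n 0] := by
      rw [List.take_add_one, List.getElem?_eq_getElem hnl, List.getD_eq_getElem ds 0 hnl]
      rfl
    have h2 : (ds.take (n+1)).drop 1 = (ds.take n).drop 1 ++ [ds.getD n 0] := by
      rw [h1, List.drop_append_of_le_length (by simp; omega)]
    rw [h2, List.foldl_append, IH (by omega), List.foldl_cons, List.foldl_nil,
        gf_succ ds k n hn]
    unfold pvStepA
    dsimp only
    split <;> rfl

lemma dpB_len (ds : List Int) (k : Int) : ∀ m : Nat, (pvDpB ds k m).length = m + 1 := by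
  intro m; induction m with
  | zero => rfl
  | succ m ih => rw [pvDpB]; simp [ih]

lemma inner_spec (ds : List Int) (k : Int) (dp : List Int) (i : Nat)
    (hd : ∀ n : Nat, 0 ≤ ds.getD n 0 ∧ ds.getD n 0 ≤ k)
    (hdp : ∀ j : Nat, j < i → dp.getD j 0 = (gf ds k j).1)
    (hkey : ∀ j : Nat, j ≤ i → segv ds j i ≤ k → (gf ds k i).1 - 1 ≤ (gf ds k j).1) :
    ∀ f : Nat, f < i → ∀ val p best : Int,
      val = segv ds f i → p = 10 ^ (i - f) →
      (gf ds k i).1 ≤ best →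
      (best = (gf ds k i).1 ∨
        ∃ jc : Nat, jc < f ∧ segv ds jc i ≤ k ∧ (gf ds k jc).1 = (gf ds k i).1 - 1) →
      pvInnerB ds dp k f val p best = (gf ds k i).1 := by
  intro f
  induction f with
  | zero =>
    intro _ val p best _ _ _ hU
    rcases hU with h | ⟨jc, hjc, _⟩
    · exact h
    · omega
  | succ f IH =>
    intro hfi val p best hval hp hbest hU
    rw [pvInnerB]
    have hv : ds.getD f 0 * p + val = segv ds f i := by
      rw [segv_peel ds i (by omega), hval, hp]
      have he : i - (f+1) = i - 1 - f := by omega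
      rw [he]
    split
    · -- break: val > k
      rename_i hbreak
      rcases hU with h | ⟨jc, hjc, hfe, _⟩
      · exact h
      · exfalso
        have := segv_mono ds (fun m => (hd m).1) (show jc ≤ f by omega) i
        rw [← hv] at this
        omega
    · rename_i hnb
      rw [not_lt] at hnb
      have hdpf : dp.getD f 0 = (gf ds k f).1 := hdp f (by omega)
      have hkf : (gf ds k i).1 - 1 ≤ (gf ds k f).1 := by
        apply hkey f (by omega)
        rw [← hv]; exact hnb
      apply IH (by omega)
      · exact hv
      · rw [hp, ← pow_succ]
        congr 1
        omega
      · rw [hdpf]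
        split <;> omega
      · rcases hU with h | ⟨jc, hjc, hfe, hT⟩
        · left
          rw [hdpf]
          split <;> omega
        · by_cases hjf : jc = f
          · left
            subst hjf
            rw [hdpf, hT]
            split <;> omega
          · right
            exact ⟨jc, by omega, hfe, hT⟩

lemma dp_eq (ds : List Int) (k : Int)
    (hd : ∀ n : Nat, 0 ≤ ds.getD n 0 ∧ ds.getD n 0 ≤ k) :
    ∀ m : Nat, ∀ j : Nat, j ≤ m → (pvDpB ds k m).getD j 0 = (gf ds k j).1 := by
  intro m
  induction m with
  | zero =>
    intro j hj
    interval_cases j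
    rfl
  | succ m ih =>
    intro j hj
    rw [pvDpB]
    by_cases hjm : j ≤ m
    · rw [List.getD_append _ _ _ _ (by rw [dpB_len]; omega)]
      exact ih j hjm
    · have hje : j = m + 1 := by omega
      subst hje
      rw [List.getD_append_right _ _ _ _ (by rw [dpB_len])]
      rw [dpB_len]
      simp only [Nat.sub_self, List.getD_cons_zero]
      obtain ⟨hc, ht, htk, hcA, he, hkey⟩ := ginv ds k hd (m+1) (by omega)
      apply inner_spec ds k (pvDpB ds k m) (m+1) hd
        (fun j hj => ih j (by omega)) hkey m (by omega)
      · exact (segv_single ds m).symm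
      · have : m + 1 - m = 1 := by omega
        rw [this, pow_one]
      · rw [ih m le_rfl]
        have := hkey m (by omega) (by rw [segv_single]; exact (hd m).2)
        omega
      · by_cases hcm : (gf ds k (m+1)).2.2 = m
        · left
          have h2 := hcA
          rw [hcm] at h2
          rw [ih m le_rfl, h2]
          ring
        · right
          refine ⟨(gf ds k (m+1)).2.2, by omega, ?_, hcA⟩
          rw [← ht]
          exact htk

lemma body_eq (s : String) (k : Int) (hne : s.toList ≠ [])
    (hd : ∀ n : Nat, 0 ≤ (pvDigitsB s).getD n 0 ∧ (pvDigitsB s).getD n 0 ≤ k) :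
    pvBodyA s k = pvBodyB s k := by
  simp only [pvBodyA, pvBodyB, pvDigitsB] at *
  set ds := s.toList.map (fun c => (PySem.Int.ofChars? [c]).getD 0) with hds
  have hlen : 1 ≤ ds.length := by
    rw [hds, List.length_map]
    have : s.toList.length ≠ 0 := fun h => hne (List.eq_nil_of_length_eq_zero h)
    omega
  rw [PySem.List.pyGetD_of_nonneg _ _ le_rfl,
      PySem.List.slice_from _ (by norm_num : (0:Int) ≤ 1)]
  simp only [Int.toNat_zero, Int.toNat_one]
  have hfold := gf_fold ds k ds.length hlen le_rfl
  rw [List.take_length] at hfold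
  rw [hfold]
  exact (dp_eq ds k hd ds.length ds.length le_rfl).symm

lemma char_digit_cases (c : Char) (h1 : '0' ≤ c) (h2 : c ≤ '9') :
    c ∈ ['0','1','2','3','4','5','6','7','8','9'] := by
  have l1 : 48 ≤ c.toNat := Char.le_def.mp h1
  have l2 : c.toNat ≤ 57 := Char.le_def.mp h2
  have hofn := Char.ofNat_toNat c
  have hc : c.toNat = 48 ∨ c.toNat = 49 ∨ c.toNat = 50 ∨ c.toNat = 51 ∨ c.toNat = 52 ∨
      c.toNat = 53 ∨ c.toNat = 54 ∨ c.toNat = 55 ∨ c.toNat = 56 ∨ c.toNat = 57 := by omega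
  rcases hc with h|h|h|h|h|h|h|h|h|h <;> rw [h] at hofn <;> rw [← hofn] <;> decide

lemma digit_ofChars (c : Char) (h1 : '0' ≤ c) (h2 : c ≤ '9') :
    PySem.Int.ofChars? [c] = some ((c.toNat : Int) - 48) := by
  have hc := char_digit_cases c h1 h2
  fin_cases hc <;> decide

lemma singleton_not_lt (xs : List Char) (kc m : Char) (hx : xs = [kc])
    (h2 : ¬ (xs < [m])) : m.toNat ≤ kc.toNat := by
  subst hx
  have h3 : ¬ (kc < m) := fun hh => h2 (List.Lex.rel hh)
  exact Char.le_def.mp (Std.not_lt.mp h3)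

lemma max_le_of_not_gt (k : Int) (h0 : 0 ≤ k) (h9 : k ≤ 9) (m : Char)
    (h2 : ¬ (PySem.Int.toChars k < [m])) : (m.toNat : Int) ≤ 48 + k := by
  interval_cases k
  · have h5 : m.toNat ≤ 48 := singleton_not_lt _ '0' m (by decide) h2; omega
  · have h5 : m.toNat ≤ 49 := singleton_not_lt _ '1' m (by decide) h2; omega
  · have h5 : m.toNat ≤ 50 := singleton_not_lt _ '2' m (by decide) h2; omega
  · have h5 : m.toNat ≤ 51 := singleton_not_lt _ '3' m (by decide) h2; omega
  · have h5 : m.toNat ≤ 52 := singleton_not_lt _ '4' m (by decide) h2; omega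
  · have h5 : m.toNat ≤ 53 := singleton_not_lt _ '5' m (by decide) h2; omega
  · have h5 : m.toNat ≤ 54 := singleton_not_lt _ '6' m (by decide) h2; omega
  · have h5 : m.toNat ≤ 55 := singleton_not_lt _ '7' m (by decide) h2; omega
  · have h5 : m.toNat ≤ 56 := singleton_not_lt _ '8' m (by decide) h2; omega
  · have h5 : m.toNat ≤ 57 := singleton_not_lt _ '9' m (by decide) h2; omega

lemma hd_of_digits (s : String) (k : Int) (hk0 : 0 ≤ k)
    (hdigits : ∀ c ∈ s.toList, '0' ≤ c ∧ c ≤ '9')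
    (hub : ∀ c ∈ s.toList, (c.toNat : Int) - 48 ≤ k) :
    ∀ n : Nat, 0 ≤ (pvDigitsB s).getD n 0 ∧ (pvDigitsB s).getD n 0 ≤ k := by
  intro n
  by_cases hn : n < (pvDigitsB s).length
  · rw [List.getD_eq_getElem _ 0 hn]
    have hn' : n < s.toList.length := by
      simpa [pvDigitsB] using hn
    simp only [pvDigitsB, List.getElem_map]
    have hcmem : s.toList[n] ∈ s.toList := List.getElem_mem hn'
    obtain ⟨hc0, hc9⟩ := hdigits _ hcmem
    rw [digit_ofChars _ hc0 hc9]
    have l1 : 48 ≤ (s.toList[n]).toNat := Char.le_def.mp hc0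
    have l2 := hub _ hcmem
    constructor
    · simp only [Option.getD_some]
      omega
    · simpa using l2
  · rw [List.getD_eq_default _ 0 (by omega)]
    exact ⟨le_rfl, hk0⟩

-- ===== VERDICT (by name: the statement is the Claim_ definition above) =====
theorem minimumPartition_spec : Claim_equal_minimumPartition := by
  intro s k _ hpre
  obtain ⟨hne, hdisj⟩ := hpre
  show minimumPartition s k = minimumPartition_alt s k
  by_cases hk : k ≤ 9
  · cases hmax : PySem.List.max? s.toList (fun c => c) with
    | none => exact absurd ((PySem.List.max?_eq_none_iff _ _).mp hmax) hne
    | some m =>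
      simp only [minimumPartition, minimumPartition_alt, if_pos hk, hmax]
      by_cases hlt : PySem.Int.toChars k < [m]
      · rw [if_pos hlt, if_pos hlt]
      · rw [if_neg hlt, if_neg hlt]
        have hdigits : ∀ c ∈ s.toList, '0' ≤ c ∧ c ≤ '9' := by
          rcases hdisj with h | ⟨_, hany⟩
          · simpa using h
          · rw [hmax] at hany
            simp at hany
            exact absurd hany hlt
        have hk0 : 0 ≤ k := by
          by_contra hneg
          rw [not_le] at hneg
          have hm : m ∈ s.toList := PySem.List.max?_mem hmax
          have h0 : '0' ≤ m := (hdigits m hm).1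
          apply hlt
          rw [show PySem.Int.toChars k = '-' :: Nat.toDigits 10 k.natAbs by
                simp [PySem.Int.toChars, hneg]]
          exact List.Lex.rel (lt_of_lt_of_le (by decide : '-' < '0') h0)
        apply body_eq s k hne
        apply hd_of_digits s k hk0 hdigits
        intro c hc
        have h1 : c ≤ m := PySem.List.max?_isMax hmax c hc
        have h1' : (c.toNat : Int) ≤ (m.toNat : Int) := by
          exact_mod_cast Char.le_def.mp h1
        have h2 := max_le_of_not_gt k hk0 hk m hlt
        omega
  · simp only [minimumPartition, minimumPartition_alt, if_neg hk]
    have hdigits : ∀ c ∈ s.toList, '0' ≤ c ∧ c ≤ '9' := by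
      rcases hdisj with h | ⟨hk9, _⟩
      · simpa using h
      · omega
    apply body_eq s k hne
    apply hd_of_digits s k (by omega) hdigits
    intro c hc
    have l2 : c.toNat ≤ 57 := Char.le_def.mp (hdigits c hc).2
    omega
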